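-- pv_equiv track=rewrite | github.com/RoyalNoa/CapiAgentes2 | Backend/src/core/semantics/entity_extractor.py | _select_primary_format
-- ===== SOURCE A (Python) =====
-- from typing import Dict, List, Optional, Any, Tuple
--
-- def _select_primary_format(formats_detected: List[str]) -> Optional[str]:
--     """Selecciona el formato más relevante detectado"""
--     if not formats_detected:
--         return None
--
--     priority = ['excel', 'csv', 'word', 'pdf', 'text']
--     for candidate in priority:
--         if candidate in formats_detected:
--             return candidate
--
--     return formats_detected[0]
-- ===== SOURCE B (Python) =====
-- from typing import List, Optional
--
-- def _select_primary_format(formats_detected: List[str]) -> Optional[str]: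
--     """Selecciona el formato mas relevante detectado"""
--     if not formats_detected:
--         return None
--     rank = {'excel': 0, 'csv': 1, 'word': 2, 'pdf': 3, 'text': 4}
--     return min(formats_detected, key=lambda f: rank.get(f, 5))
-- ===== Notes on version B (the rewrite author's own statement) =====
-- stated objective: alternative
-- what changed: Instead of scanning the fixed priority list and doing a membership test on the input per candidate, B builds a rank dict once and takes min over the input keyed by rank (unknown formats rank 5), relying on min returning the first minimal element.
import Mathlib
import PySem

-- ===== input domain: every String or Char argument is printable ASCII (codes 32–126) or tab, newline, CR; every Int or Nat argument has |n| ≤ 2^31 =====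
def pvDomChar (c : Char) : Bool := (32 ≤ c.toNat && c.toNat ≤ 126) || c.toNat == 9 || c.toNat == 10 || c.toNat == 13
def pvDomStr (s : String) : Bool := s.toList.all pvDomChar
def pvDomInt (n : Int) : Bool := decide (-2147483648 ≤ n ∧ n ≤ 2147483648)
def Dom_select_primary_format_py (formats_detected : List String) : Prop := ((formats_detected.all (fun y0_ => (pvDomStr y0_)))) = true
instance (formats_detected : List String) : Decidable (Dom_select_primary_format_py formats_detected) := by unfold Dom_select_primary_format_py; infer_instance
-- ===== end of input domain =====

-- B replaces A's scan over the priority list (with a membership test on the input per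
-- candidate) by a single min-by-rank pass over the input; an alternative decomposition of the same cost.


-- ===== PORT A =====
-- priority = ['excel', 'csv', 'word', 'pdf', 'text']
def pyPriority : List String := ["excel", "csv", "word", "pdf", "text"]

-- 'for candidate in priority: if candidate in formats_detected: return candidate' = find?
def select_primary_format_py (formats_detected : List String) : Option String :=
  if formats_detected = [] then none
  else
    match pyPriority.find? (fun c => formats_detected.contains c) with
    | some c => some c
    | none => PySem.List.pyGet? formats_detected 0

-- ===== PORT B =====
-- rank = {'excel': 0, 'csv': 1, 'word': 2, 'pdf': 3, 'text': 4}
def pyRank : PySem.Dict String Int :=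
  PySem.Dict.ofList [("excel", 0), ("csv", 1), ("word", 2), ("pdf", 3), ("text", 4)]

def select_primary_format_py_alt (formats_detected : List String) : Option String :=
  if formats_detected = [] then none
  else PySem.List.min? formats_detected (fun f => pyRank.getD f 5)

-- ===== PRECONDITION & SPEC =====
def Spec_select_primary_format_py (formats_detected : List String) (out : Option String) : Prop := out = select_primary_format_py_alt formats_detected
instance (formats_detected : List String) (out : Option String) : Decidable (Spec_select_primary_format_py formats_detected out) := by unfold Spec_select_primary_format_py; infer_instance

-- ===== CLAIM (what is proved, stated in full; the proofs are below) =====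
def Claim_equal_select_primary_format_py : Prop := ∀ (formats_detected : List String), Dom_select_primary_format_py formats_detected → Spec_select_primary_format_py formats_detected (select_primary_format_py formats_detected)

-- ===== LEMMAS AND PROOFS =====

def pyKey (f : String) : Int := pyRank.getD f 5

theorem pyKey_eq (f : String) :
    pyKey f = if "excel" = f then 0 else if "csv" = f then 1 else if "word" = f then 2
      else if "pdf" = f then 3 else if "text" = f then 4 else 5 := by
  have h : pyRank
      = PySem.Dict.mk [("excel", 0), ("csv", 1), ("word", 2), ("pdf", 3), ("text", 4)] := by
    decide
  simp only [pyKey, h, PySem.Dict.getD, PySem.Dict.get?_mk_cons, beq_iff_eq]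
  split_ifs <;> rfl

theorem pyKey_nonneg (f : String) : 0 ≤ pyKey f := by
  rw [pyKey_eq]; split_ifs <;> omega

theorem pyKey_le_five (f : String) : pyKey f ≤ 5 := by
  rw [pyKey_eq]; split_ifs <;> omega

theorem pyKey_lt_five_cases (f : String) (h : pyKey f < 5) :
    f = "excel" ∨ f = "csv" ∨ f = "word" ∨ f = "pdf" ∨ f = "text" := by
  rw [pyKey_eq] at h
  split_ifs at h <;> simp_all

theorem pyKey_inj (a b : String) (hlt : pyKey a < 5) (h : pyKey a = pyKey b) : a = b := by
  have hlt' : pyKey b < 5 := by omega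
  rcases pyKey_lt_five_cases a hlt with ha | ha | ha | ha | ha <;>
    rcases pyKey_lt_five_cases b hlt' with hb | hb | hb | hb | hb <;>
      subst ha <;> subst hb <;> revert h <;> decide

-- once the accumulator holds a minimal element, the min? fold never replaces it
theorem foldl_min_stay (g : Option String → String → Option String)
    (hg : ∀ (m y : String), ¬ pyKey y < pyKey m → g (some m) y = some m)
    (t : List String) (m : String) (h : ∀ y ∈ t, ¬ pyKey y < pyKey m) :
    t.foldl g (some m) = some m := by
  induction t with
  | nil => rfl
  | cons y t ih =>
    rw [List.foldl_cons, hg m y (h y List.mem_cons_self)]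
    exact ih (fun z hz => h z (List.mem_cons_of_mem y hz))

theorem min?_all_five (x : String) (t : List String)
    (h : ∀ y ∈ x :: t, pyKey y = 5) :
    PySem.List.min? (x :: t) pyKey = some x := by
  have hstay : ∀ y ∈ t, ¬ pyKey y < pyKey x := by
    intro y hy
    rw [h y (List.mem_cons_of_mem x hy), h x List.mem_cons_self]
    omega
  simp only [PySem.List.min?, List.foldl_cons]
  exact foldl_min_stay _ (fun m y hmy => by simp [hmy]) t x hstay

-- min-by-rank picks c when c is in the input and nothing of strictly smaller rank is
theorem min?_picks (xs : List String) (c : String)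
    (hc5 : pyKey c < 5) (hmem : c ∈ xs)
    (hbefore : ∀ d : String, pyKey d < pyKey c → d ∉ xs) :
    PySem.List.min? xs pyKey = some c := by
  obtain ⟨m, hm⟩ : ∃ m, PySem.List.min? xs pyKey = some m := by
    cases h : PySem.List.min? xs pyKey with
    | none =>
      rw [PySem.List.min?_eq_none_iff] at h
      subst h; simp at hmem
    | some m => exact ⟨m, rfl⟩
  have hmmem : m ∈ xs := PySem.List.min?_mem hm
  have hmin : ∀ y ∈ xs, pyKey m ≤ pyKey y := PySem.List.min?_isMin hm
  have hle : pyKey m ≤ pyKey c := hmin c hmem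
  by_cases hlt : pyKey m < pyKey c
  · exact absurd hmmem (hbefore m hlt)
  · have heq : pyKey m = pyKey c := le_antisymm hle (not_lt.mp hlt)
    rw [hm, pyKey_inj m c (by omega) heq]

-- ===== VERDICT (by name: the statement is the Claim_ definition above) =====
theorem select_primary_format_py_spec : Claim_equal_select_primary_format_py := by
  intro xs _
  unfold Spec_select_primary_format_py select_primary_format_py select_primary_format_py_alt
  by_cases hnil : xs = []
  · simp [hnil]
  · rw [if_neg hnil, if_neg hnil]
    have key_def : (fun f => pyRank.getD f (5 : Int)) = pyKey := rfl
    rw [key_def]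
    by_cases h1 : "excel" ∈ xs
    · rw [show pyPriority.find? (fun c => xs.contains c) = some "excel" by
        simp [pyPriority, h1]]
      refine (min?_picks xs "excel" (by decide) h1 ?_).symm
      intro d hd
      have h0 : (0:Int) ≤ pyKey d := pyKey_nonneg d; have hc : pyKey "excel" = 0 := by decide
      omega
    · by_cases h2 : "csv" ∈ xs
      · rw [show pyPriority.find? (fun c => xs.contains c) = some "csv" by
          simp [pyPriority, List.find?, h1, h2]]
        refine (min?_picks xs "csv" (by decide) h2 ?_).symm
        intro d hd
        have hd5 : pyKey d < 5 := lt_trans hd (by decide)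
        rcases pyKey_lt_five_cases d hd5 with h | h | h | h | h <;> subst h <;>
          first | exact h1 | exact absurd hd (by decide)
      · by_cases h3 : "word" ∈ xs
        · rw [show pyPriority.find? (fun c => xs.contains c) = some "word" by
            simp [pyPriority, List.find?, h1, h2, h3]]
          refine (min?_picks xs "word" (by decide) h3 ?_).symm
          intro d hd
          have hd5 : pyKey d < 5 := lt_trans hd (by decide)
          rcases pyKey_lt_five_cases d hd5 with h | h | h | h | h <;> subst h <;>
            first | exact h1 | exact h2 | exact absurd hd (by decide)
        · by_cases h4 : "pdf" ∈ xs
          · rw [show pyPriority.find? (fun c => xs.contains c) = some "pdf" by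
              simp [pyPriority, List.find?, h1, h2, h3, h4]]
            refine (min?_picks xs "pdf" (by decide) h4 ?_).symm
            intro d hd
            have hd5 : pyKey d < 5 := lt_trans hd (by decide)
            rcases pyKey_lt_five_cases d hd5 with h | h | h | h | h <;> subst h <;>
              first | exact h1 | exact h2 | exact h3 | exact absurd hd (by decide)
          · by_cases h5 : "text" ∈ xs
            · rw [show pyPriority.find? (fun c => xs.contains c) = some "text" by
                simp [pyPriority, List.find?, h1, h2, h3, h4, h5]]
              refine (min?_picks xs "text" (by decide) h5 ?_).symm
              intro d hd
              have hd5 : pyKey d < 5 := lt_trans hd (by decide)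
              rcases pyKey_lt_five_cases d hd5 with h | h | h | h | h <;> subst h <;>
                first | exact h1 | exact h2 | exact h3 | exact h4 | exact absurd hd (by decide)
            · rw [show pyPriority.find? (fun c => xs.contains c) = none by
                simp [pyPriority, List.find?, h1, h2, h3, h4, h5]]
              obtain ⟨x, t, rfl⟩ : ∃ x t, xs = x :: t := by
                cases xs with
                | nil => exact absurd rfl hnil
                | cons x t => exact ⟨x, t, rfl⟩
              have hall : ∀ y ∈ x :: t, pyKey y = 5 := by
                intro y hy
                by_contra hne
                have hy5 : pyKey y < 5 := lt_of_le_of_ne (pyKey_le_five y) hne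
                rcases pyKey_lt_five_cases y hy5 with h | h | h | h | h <;> subst h <;>
                  first | exact h1 hy | exact h2 hy | exact h3 hy | exact h4 hy | exact h5 hy
              rw [min?_all_five x t hall]
              simp [PySem.List.pyGet?, PySem.List.pyIdx?]
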